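-- pv_equiv track=rewrite | github.com/JangDongHo/Dongho-Algorithm-Note | Recursion/Problem/PGS 유전 법칙.py | dfs
-- ===== SOURCE A (Python) =====
-- def dfs(n, p):
--     # Base Case
--     if n == 1:
--         return "Rr"
--
--     # Recursive Case
--     parent_idx = (p - 1) // 4 + 1 # 1-index
--     parent = dfs(n - 1, parent_idx) # 부모의 형질 계산
--     child_idx = (p - 1) % 4 # 부모의 자식 중 몇 번째인지 계산
--
--     if parent == "RR":
--         return "RR"
--     elif parent == "rr":
--         return "rr"
--     else:  # parent == "Rr"
--         return ["RR", "Rr", "Rr", "rr"][child_idx]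
-- ===== SOURCE B (Python) =====
-- def dfs(n, p):
--     # Iterative version: walk up from (n, p) collecting the child index at
--     # each level, then replay the path from the root downwards.
--     idxs = []
--     while n > 1:
--         idxs.append((p - 1) % 4)
--         p = (p - 1) // 4 + 1
--         n -= 1
--     trait = "Rr"
--     for idx in reversed(idxs):  # root to leaf
--         if trait == "Rr":
--             trait = ["RR", "Rr", "Rr", "rr"][idx]
--     return trait
-- ===== Notes on version B (the rewrite author's own statement) =====
-- stated objective: alternative
-- what changed: Replaces the recursive descent by an explicit iterative two-phase walk: first a loop climbing from (n,p) to the root collecting each child index, then a loop replaying those indices from the root, mutating the trait only while it is 'Rr'.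
-- outside the precondition, e.g. on dfs(0, 1): A raises RecursionError, B returns 'Rr'; on dfs(950, 1): A returns 'RR', B returns 'RR'
import Mathlib
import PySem

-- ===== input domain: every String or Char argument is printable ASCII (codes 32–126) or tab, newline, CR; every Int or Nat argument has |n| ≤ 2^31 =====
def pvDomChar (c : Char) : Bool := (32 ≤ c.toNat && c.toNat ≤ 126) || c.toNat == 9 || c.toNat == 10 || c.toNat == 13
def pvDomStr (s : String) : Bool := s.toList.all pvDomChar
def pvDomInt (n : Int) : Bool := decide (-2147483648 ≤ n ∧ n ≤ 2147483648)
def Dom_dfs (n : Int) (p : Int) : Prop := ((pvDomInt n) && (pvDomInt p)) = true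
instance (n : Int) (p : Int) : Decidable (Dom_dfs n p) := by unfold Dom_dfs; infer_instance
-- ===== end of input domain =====

-- B replaces A's recursion by an iterative up-then-down replay of the path; same values, no recursion.

-- ===== PORT A =====
-- Literal port of A's recursion. The 'n < 1' guard only makes the function
-- total in Lean: Python A never terminates there (RecursionError), and such
-- inputs are outside Pre_dfs.
def dfs (n : Int) (p : Int) : String :=
  if n == 1 then "Rr"
  else if n < 1 then "Rr"  -- totality guard; unreachable inside Pre_dfs
  else
    let parentIdx := PySem.Int.floordiv (p - 1) 4 + 1
    let parent := dfs (n - 1) parentIdx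
    let childIdx := PySem.Int.mod (p - 1) 4
    if parent == "RR" then "RR"
    else if parent == "rr" then "rr"
    else (PySem.List.pyGet? ["RR", "Rr", "Rr", "rr"] childIdx).getD ""  -- index is (p-1)%4 ∈ [0,4): always in range, default unreachable
termination_by n.toNat
decreasing_by omega

-- ===== PORT B =====
-- upward phase of Source B's while-loop: collect child indices leaf-first
def dfsClimb (n : Int) (p : Int) : List Int :=
  if n > 1 then
    PySem.Int.mod (p - 1) 4 :: dfsClimb (n - 1) (PySem.Int.floordiv (p - 1) 4 + 1)
  else []
termination_by n.toNat
decreasing_by omega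

def dfs_alt (n : Int) (p : Int) : String :=
  (dfsClimb n p).reverse.foldl
    (fun trait idx =>
      if trait == "Rr" then (PySem.List.pyGet? ["RR", "Rr", "Rr", "rr"] idx).getD "" else trait)
    "Rr"

-- ===== PRECONDITION & SPEC =====
-- Pre_ excludes n ≤ 0 (A recurses forever → RecursionError) and, conservatively,
-- n > 900 (A's recursion depth is n; CPython's default recursion limit 1000 makes
-- A raise RecursionError slightly above that, so a margin is kept).
def Pre_dfs (n : Int) (_p : Int) : Prop := 1 ≤ n ∧ n ≤ 900
instance (n : Int) (p : Int) : Decidable (Pre_dfs n p) := by unfold Pre_dfs; infer_instance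
def pvWitness_dfs : Int × Int := (3, 7)

def Spec_dfs (n : Int) (p : Int) (out : String) : Prop := out = dfs_alt n p
instance (n : Int) (p : Int) (out : String) : Decidable (Spec_dfs n p out) := by unfold Spec_dfs; infer_instance

-- ===== CLAIM (what is proved, stated in full; the proofs are below) =====
def Claim_equal_dfs : Prop := ∀ (n : Int) (p : Int), Dom_dfs n p → Pre_dfs n p → Spec_dfs n p (dfs n p)

-- ===== LEMMAS AND PROOFS =====

-- the fold step of dfs_alt, named for the proofs
def geneStep (trait : String) (idx : Int) : String :=
  if trait == "Rr" then (PySem.List.pyGet? ["RR", "Rr", "Rr", "rr"] idx).getD "" else trait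

theorem dfs_alt_eq_foldl (n p : Int) :
    dfs_alt n p = (dfsClimb n p).reverse.foldl geneStep "Rr" := rfl

theorem dfs_values (n p : Int) (h : 1 ≤ n) :
    dfs n p = "RR" ∨ dfs n p = "Rr" ∨ dfs n p = "rr" := by
  induction hk : n.toNat generalizing n p with
  | zero => omega
  | succ k ih =>
    by_cases h1 : n = 1
    · subst h1; refine Or.inr (Or.inl ?_); rw [dfs]; simp
    · have h2 : 2 ≤ n := by omega
      rw [dfs]
      simp only [show (n == 1) = false by simp [h1], Bool.false_eq_true, if_false,
        show ¬ n < 1 by omega, if_false]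
      rcases ih (n - 1) (PySem.Int.floordiv (p - 1) 4 + 1) (by omega) (by omega) with hv | hv | hv <;>
        simp only [hv]
      · simp
      · have hm0 : 0 ≤ PySem.Int.mod (p - 1) 4 := PySem.Int.mod_nonneg _ (by norm_num)
        have hm4 : PySem.Int.mod (p - 1) 4 < 4 := PySem.Int.mod_lt _ (by norm_num)
        set m := PySem.Int.mod (p - 1) 4 with hm
        interval_cases m <;> simp [PySem.List.pyGet?, PySem.List.pyIdx?]
      · simp

theorem dfs_eq_fold (n p : Int) (h : 1 ≤ n) :
    dfs n p = (dfsClimb n p).reverse.foldl geneStep "Rr" := by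
  induction hk : n.toNat generalizing n p with
  | zero => omega
  | succ k ih =>
    by_cases h1 : n = 1
    · subst h1
      rw [dfs, dfsClimb]; simp
    · have h2 : 2 ≤ n := by omega
      rw [dfs, dfsClimb]
      simp only [show (n == 1) = false by simp [h1], Bool.false_eq_true, if_false,
        show ¬ n < 1 by omega, if_false, show n > 1 by omega, if_true,
        List.reverse_cons, List.foldl_append, List.foldl_cons, List.foldl_nil]
      rw [← ih (n - 1) (PySem.Int.floordiv (p - 1) 4 + 1) (by omega) (by omega)]
      have hfd : PySem.Int.floordiv (p - 1) 4 = (p - 1) / 4 :=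
        PySem.Int.floordiv_eq_ediv_of_pos (by norm_num)
      rcases dfs_values (n - 1) (PySem.Int.floordiv (p - 1) 4 + 1) (by omega) with hv | hv | hv <;>
        rw [hfd] at hv <;> simp [hv, geneStep]

-- ===== VERDICT (by name: the statement is the Claim_ definition above) =====
theorem dfs_spec : Claim_equal_dfs := by
  intro n p _ hpre
  unfold Spec_dfs
  rw [dfs_alt_eq_foldl, dfs_eq_fold n p hpre.1]
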